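-- pv_equiv track=rewrite | github.com/always97/algorithm | BOJ/Bronze/5236.py | find_lds
-- ===== SOURCE A (Python) =====
-- def find_lds(word):
--   n = len(word)
--   if n == 0:
--     return ""
--   lds = word[-1]
--
--   for i in range(n-2, -1, -1) :
--     if word[i] > lds[0]:
--       lds = word[i] + lds
--     else :
--       break;
--   return lds
-- ===== SOURCE B (Python) =====
-- def find_lds(word):
--   n = len(word)
--   if n == 0:
--     return ""
--   start = 0
--   for i in range(1, n):
--     if word[i] >= word[i-1]:
--       start = i
--   return word[start:]
-- ===== Notes on version B (the rewrite author's own statement) =====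
-- stated objective: alternative
-- what changed: Replaces the backward early-stopping scan that builds the result by prepending characters one at a time with a single forward pass that only tracks the start index of the current strictly-decreasing run and returns one final slice.
import Mathlib
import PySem

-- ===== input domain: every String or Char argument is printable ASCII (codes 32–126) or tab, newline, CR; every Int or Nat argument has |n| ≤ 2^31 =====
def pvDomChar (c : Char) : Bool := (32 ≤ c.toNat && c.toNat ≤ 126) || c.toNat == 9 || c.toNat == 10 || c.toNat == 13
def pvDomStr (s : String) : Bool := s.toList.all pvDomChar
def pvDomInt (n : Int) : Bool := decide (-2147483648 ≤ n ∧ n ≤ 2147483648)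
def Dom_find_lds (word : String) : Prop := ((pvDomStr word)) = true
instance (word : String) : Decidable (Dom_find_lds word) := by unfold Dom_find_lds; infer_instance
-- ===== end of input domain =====

-- B replaces A's backward prepend-until-break scan by a forward pass tracking the start index of the current strictly-decreasing run, returned as one slice.

-- ===== PORT A =====
-- the for-loop with its break: recursion over the index list, returning lds on break
def findLdsLoopA (cs : List Char) : List Int → List Char → List Char
  | [], lds => lds
  | i :: is, lds =>
      if PySem.List.pyGetD lds 0 ' ' < PySem.List.pyGetD cs i ' ' then
        findLdsLoopA cs is (PySem.List.pyGetD cs i ' ' :: lds)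
      else lds

def find_lds (word : String) : String :=
  let cs := word.toList
  let n : Int := PySem.List.len cs
  if n == 0 then "" else
    let lds : List Char := [PySem.List.pyGetD cs (-1) ' ']
    String.ofList (findLdsLoopA cs (PySem.List.pyRange (n - 2) (-1) (-1)) lds)

-- ===== PORT B =====
def find_lds_alt (word : String) : String :=
  let cs := word.toList
  let n : Int := PySem.List.len cs
  if n == 0 then "" else
    let start : Int := (PySem.List.pyRange 1 n 1).foldl
      (fun st i => if PySem.List.pyGetD cs (i - 1) ' ' ≤ PySem.List.pyGetD cs i ' ' then i else st) 0
    String.ofList (PySem.List.slice cs (some start) none)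

-- ===== PRECONDITION & SPEC =====
def Spec_find_lds (word : String) (out : String) : Prop := out = find_lds_alt word
instance (word : String) (out : String) : Decidable (Spec_find_lds word out) := by unfold Spec_find_lds; infer_instance

-- ===== CLAIM (what is proved, stated in full; the proofs are below) =====
def Claim_equal_find_lds : Prop := ∀ (word : String), Dom_find_lds word → Spec_find_lds word (find_lds word)

-- ===== LEMMAS AND PROOFS =====

-- B's fold over range 1 k (proof-side abbreviation; definitionally B's start computation)
def sB (cs : List Char) (k : Int) : Int :=
  (PySem.List.pyRange 1 k 1).foldl
    (fun st i => if PySem.List.pyGetD cs (i - 1) ' ' ≤ PySem.List.pyGetD cs i ' ' then i else st) 0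

lemma sB_succ (cs : List Char) (k : Int) (hk : 1 ≤ k) :
    sB cs (k + 1) =
      if PySem.List.pyGetD cs (k - 1) ' ' ≤ PySem.List.pyGetD cs k ' ' then k else sB cs k := by
  unfold sB
  rw [PySem.List.pyRange_one_succ_right hk, List.foldl_append]
  simp

lemma sB_one (cs : List Char) : sB cs 1 = 0 := by
  unfold sB
  rw [PySem.List.pyRange_one_eq_nil le_rfl]
  rfl

lemma sB_nonneg (cs : List Char) (k : Int) : 0 ≤ sB cs k := by
  unfold sB
  have main : ∀ (l : List Int) (st : Int), 0 ≤ st → (∀ i ∈ l, 0 ≤ i) →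
      0 ≤ l.foldl (fun st i =>
        if PySem.List.pyGetD cs (i - 1) ' ' ≤ PySem.List.pyGetD cs i ' ' then i else st) st := by
    intro l
    induction l with
    | nil => intro st h _; simpa using h
    | cons a t ih =>
        intro st h hall
        simp only [List.foldl_cons]
        apply ih
        · split
          · exact hall a (by simp)
          · exact h
        · intro i hi; exact hall i (by simp [hi])
  exact main _ 0 le_rfl (fun i hi => by
    have := PySem.List.mem_pyRange_one.mp hi; omega)

-- head of a dropped list, as a Python get
lemma head_drop (cs : List Char) (k : Nat) :
    PySem.List.pyGetD (cs.drop k) 0 ' ' = PySem.List.pyGetD cs (k : Int) ' ' := by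
  rw [PySem.List.pyGetD_zero, PySem.List.pyGetD_natCast]
  simp [List.getD_eq_getElem?_getD]

-- prepending element k to the suffix from k+1 gives the suffix from k
lemma cons_drop (cs : List Char) (k : Nat) (h : k < cs.length) :
    PySem.List.pyGetD cs (k : Int) ' ' :: cs.drop (k + 1) = cs.drop k := by
  rw [PySem.List.pyGetD_natCast, List.getD_eq_getElem cs ' ' h]
  exact List.getElem_cons_drop h

-- the one-element list word[-1] is the suffix from length-1
lemma last_drop (cs : List Char) (h : cs ≠ []) :
    [PySem.List.pyGetD cs (-1) ' '] = cs.drop (cs.length - 1) := by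
  have hlen : 0 < cs.length := List.length_pos_of_ne_nil h
  rw [PySem.List.pyGetD_neg_ofNat cs 1 ' ' (by omega) (by omega)]
  rw [← List.getElem_cons_drop (show cs.length - 1 < cs.length by omega),
      List.drop_eq_nil_of_le (by omega)]

-- main invariant: A's loop started at index m with lds = suffix from m+1
-- equals the suffix from B's start over the first m+2 characters
lemma mainInv (cs : List Char) (m : Nat) (h : m + 2 ≤ cs.length) :
    findLdsLoopA cs (PySem.List.pyRange (m : Int) (-1) (-1)) (cs.drop (m + 1))
      = cs.drop (sB cs ((m : Int) + 2)).toNat := by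
  induction m with
  | zero =>
      simp only [Nat.cast_zero, Nat.zero_add]
      rw [PySem.List.pyRange_neg_one_cons (by norm_num),
          show (0 : Int) - 1 = -1 by ring,
          PySem.List.pyRange_neg_one_eq_nil le_rfl]
      simp only [findLdsLoopA]
      rw [show cs.drop (0 + 1) = cs.drop 1 from rfl, head_drop cs 1,
          show ((1 : Nat) : Int) = (1 : Int) by norm_num]
      have hs : sB cs (0 + 2) = if PySem.List.pyGetD cs 0 ' ' ≤ PySem.List.pyGetD cs 1 ' '
          then (1 : Int) else 0 := by
        rw [show (0 : Int) + 2 = 1 + 1 by ring, sB_succ cs 1 le_rfl,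
            show (1 : Int) - 1 = 0 by ring, sB_one]
      rw [hs]
      by_cases hc : PySem.List.pyGetD cs 1 ' ' < PySem.List.pyGetD cs 0 ' '
      · have hnle : ¬ PySem.List.pyGetD cs 0 ' ' ≤ PySem.List.pyGetD cs 1 ' ' := not_le.mpr hc
        simp only [if_pos hc, if_neg hnle]
        rw [show (0 : Int) = ((0 : Nat) : Int) by norm_num, cons_drop cs 0 (by omega)]
        simp
      · have hle : PySem.List.pyGetD cs 0 ' ' ≤ PySem.List.pyGetD cs 1 ' ' := not_lt.mp hc
        simp [hc, hle]
  | succ m ih =>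
      rw [show ((m + 1 : Nat) : Int) = (m : Int) + 1 by push_cast; ring]
      rw [PySem.List.pyRange_neg_one_cons (by omega), show (m : Int) + 1 - 1 = (m : Int) by ring]
      simp only [findLdsLoopA]
      rw [show m + 1 + 1 = m + 2 from rfl, head_drop cs (m + 2),
          show ((m + 2 : Nat) : Int) = (m : Int) + 2 by push_cast; ring]
      have hs : sB cs ((m : Int) + 1 + 2) =
          if PySem.List.pyGetD cs ((m : Int) + 1) ' ' ≤ PySem.List.pyGetD cs ((m : Int) + 2) ' '
          then (m : Int) + 2 else sB cs ((m : Int) + 2) := by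
        rw [show (m : Int) + 1 + 2 = ((m : Int) + 2) + 1 by ring, sB_succ cs _ (by omega),
            show (m : Int) + 2 - 1 = (m : Int) + 1 by ring]
      rw [hs]
      by_cases hc : PySem.List.pyGetD cs ((m : Int) + 2) ' ' < PySem.List.pyGetD cs ((m : Int) + 1) ' '
      · have hnle : ¬ PySem.List.pyGetD cs ((m : Int) + 1) ' ' ≤ PySem.List.pyGetD cs ((m : Int) + 2) ' ' :=
          not_le.mpr hc
        simp only [if_pos hc, if_neg hnle]
        rw [show (m : Int) + 1 = ((m + 1 : Nat) : Int) by push_cast; ring,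
            cons_drop cs (m + 1) (by omega)]
        exact ih (by omega)
      · have hle : PySem.List.pyGetD cs ((m : Int) + 1) ' ' ≤ PySem.List.pyGetD cs ((m : Int) + 2) ' ' :=
          not_lt.mp hc
        simp only [if_neg hc, if_pos hle]
        rw [show ((m : Int) + 2).toNat = m + 2 by omega]

-- ===== VERDICT (by name: the statement is the Claim_ definition above) =====
theorem find_lds_spec : Claim_equal_find_lds := by
  intro word _
  unfold Spec_find_lds find_lds find_lds_alt
  simp only [PySem.List.len_eq]
  by_cases hnil : word.toList = []
  · simp [hnil]
  have hlen : 0 < word.toList.length := List.length_pos_of_ne_nil hnil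
  have hne : ¬ (((word.toList.length : Int)) == 0) = true := by
    simp only [beq_iff_eq]
    exact_mod_cast (by omega : ¬ word.toList.length = 0)
  simp only [if_neg hne]
  have hBfold : (PySem.List.pyRange 1 (word.toList.length : Int) 1).foldl
      (fun st i => if PySem.List.pyGetD word.toList (i - 1) ' ' ≤ PySem.List.pyGetD word.toList i ' '
        then i else st) 0 = sB word.toList (word.toList.length : Int) := rfl
  rw [hBfold, PySem.List.slice_from _ (sB_nonneg _ _)]
  rcases hcase : word.toList.length with _ | n
  · omega
  rcases n with _ | m
  · -- length 1
    rw [show ((0 + 1 : Nat) : Int) - 2 = -1 by norm_num,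
        PySem.List.pyRange_neg_one_eq_nil (by norm_num)]
    simp only [findLdsLoopA]
    rw [last_drop word.toList hnil, hcase, show ((0 + 1 : Nat) : Int) = (1 : Int) by norm_num,
        sB_one]
    simp
  · -- length m+2
    rw [show ((m + 1 + 1 : Nat) : Int) - 2 = (m : Int) by push_cast; ring]
    rw [last_drop word.toList hnil, hcase, show m + 1 + 1 - 1 = m + 1 from rfl]
    rw [mainInv word.toList m (by omega)]
    rw [show ((m + 1 + 1 : Nat) : Int) = (m : Int) + 2 by push_cast; ring]
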